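-- pv_equiv track=rewrite | github.com/gloathub/gloat | build/count-leaves.py | count_reachable_leaves
-- ===== SOURCE A (Python) =====
-- def count_reachable_leaves(graph, node, leaves, memo=None, visiting=None):
--     """Count unique leaf nodes reachable from a given node"""
--     if memo is None:
--         memo = {}
--     if visiting is None:
--         visiting = set()
--
--     if node in memo:
--         return memo[node]
--
--     # Detect cycles
--     if node in visiting:
--         return set()
--
--     # If this node is itself a leaf
--     if node in leaves:
--         result = {node}
--         memo[node] = result
--         return result
--
--     # If this node has no dependencies (not in graph)
--     if node not in graph:
--         result = {node}
--         memo[node] = result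
--         return result
--
--     # Mark as visiting to detect cycles
--     visiting.add(node)
--
--     # Recursively find all leaves from dependencies
--     reachable = set()
--     for dep in graph[node]:
--         reachable.update(count_reachable_leaves(graph, dep, leaves, memo, visiting))
--
--     # Done visiting
--     visiting.remove(node)
--
--     memo[node] = reachable
--     return reachable
-- ===== SOURCE B (Python) =====
-- def count_reachable_leaves(graph, node, leaves, memo=None, visiting=None):
--     """Count unique leaf nodes reachable from a given node (iterative, explicit stack)"""
--     if memo is None:
--         memo = {}
--     if visiting is None:
--         visiting = set()
--
--     def settle(n):
--         # cached / trivial answer for n, or None if n must be expanded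
--         if n in memo:
--             return memo[n]
--         if n in visiting:
--             return set()
--         if n in leaves or n not in graph:
--             r = {n}
--             memo[n] = r
--             return r
--         return None
--
--     r = settle(node)
--     if r is not None:
--         return r
--
--     visiting.add(node)
--     stack = [[node, list(graph[node]), set()]]
--     while True:
--         n, rem, acc = stack[-1]
--         if not rem:
--             stack.pop()
--             visiting.discard(n)
--             memo[n] = acc
--             if not stack:
--                 return acc
--             stack[-1][2].update(acc)
--         else:
--             d = rem[0]
--             stack[-1][1] = rem[1:]
--             r = settle(d)
--             if r is not None:
--                 acc.update(r)
--             else: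
--                 visiting.add(d)
--                 stack.append([d, list(graph[d]), set()])
-- ===== Notes on version B (the rewrite author's own statement) =====
-- stated objective: alternative
-- what changed: Replaced A's recursive memoized DFS by an iterative explicit-stack post-order traversal: a while-loop over frames (node, remaining deps, accumulated set) with the same memo/visiting front guards, so the recursion (and Python's recursion-depth limit on deep graphs) disappears while every memo/visiting update happens in the same DFS order.
import Mathlib
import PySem

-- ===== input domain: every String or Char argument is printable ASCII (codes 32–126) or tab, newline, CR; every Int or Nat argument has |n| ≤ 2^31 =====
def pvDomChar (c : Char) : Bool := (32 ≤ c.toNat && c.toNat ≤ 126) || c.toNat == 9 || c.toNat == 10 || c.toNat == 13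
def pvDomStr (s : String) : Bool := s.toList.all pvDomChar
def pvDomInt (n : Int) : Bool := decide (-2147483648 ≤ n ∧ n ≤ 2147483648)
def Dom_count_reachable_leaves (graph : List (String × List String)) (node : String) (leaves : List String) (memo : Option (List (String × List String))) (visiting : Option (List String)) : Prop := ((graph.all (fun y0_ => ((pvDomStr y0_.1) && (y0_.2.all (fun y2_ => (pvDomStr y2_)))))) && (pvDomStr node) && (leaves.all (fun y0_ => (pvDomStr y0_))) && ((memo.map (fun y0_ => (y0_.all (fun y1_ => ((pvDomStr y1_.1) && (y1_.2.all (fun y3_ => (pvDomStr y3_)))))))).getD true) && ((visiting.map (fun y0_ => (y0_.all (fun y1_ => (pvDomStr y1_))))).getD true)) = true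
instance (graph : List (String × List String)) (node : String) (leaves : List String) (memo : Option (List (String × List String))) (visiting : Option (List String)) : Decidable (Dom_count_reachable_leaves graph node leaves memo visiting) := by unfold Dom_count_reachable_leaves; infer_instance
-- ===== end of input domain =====

-- B replaces A's recursive DFS by an iterative explicit-stack traversal (same memo/visiting discipline);
-- objective: alternative (no speed claim). Python A and B mutate the caller's `memo` (and `visiting`
-- transiently); the equivalence proved here is about the RETURN value only.

-- ===== PORT A =====
-- A-side helpers: measure lemmas cited by the termination proofs of the ports.
theorem pvFilterLenLe {α : Type} (p q : α → Bool) :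
    ∀ (l : List α), (∀ x ∈ l, p x = true → q x = true) →
      (l.filter p).length ≤ (l.filter q).length := by
  intro l h
  simpa [← List.countP_eq_length_filter] using List.countP_mono_left (l := l) h

theorem pvFilterLenLt {α : Type} (p q : α → Bool) (l : List α)
    (h : ∀ x ∈ l, p x = true → q x = true) (a : α) (ha : a ∈ l)
    (hp : p a = false) (hq : q a = true) :
    (l.filter p).length < (l.filter q).length := by
  induction l with
  | nil => cases ha
  | cons x xs ih =>
    have htail : ∀ y ∈ xs, p y = true → q y = true := fun y hy => h y (List.mem_cons_of_mem _ hy)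
    rcases List.mem_cons.mp ha with rfl | ha'
    · rw [List.filter_cons_of_neg (by simp [hp]), List.filter_cons_of_pos (by simp [hq])]
      exact Nat.lt_succ_of_le (pvFilterLenLe p q xs htail)
    · have hlt := ih htail ha'
      cases hpx : p x <;> cases hqx : q x
      · rw [List.filter_cons_of_neg (by simp [hpx]), List.filter_cons_of_neg (by simp [hqx])]
        exact hlt
      · rw [List.filter_cons_of_neg (by simp [hpx]), List.filter_cons_of_pos (by simp [hqx])]
        exact Nat.lt_succ_of_lt hlt
      · exact absurd (h x List.mem_cons_self hpx) (by simp [hqx])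
      · rw [List.filter_cons_of_pos (by simp [hpx]), List.filter_cons_of_pos (by simp [hqx])]
        exact Nat.succ_lt_succ hlt

theorem pvMuA_lt (graph : PySem.Dict String (List String)) (visiting : List String)
    (node : String) (hk : node ∈ graph.keys) (hn : node ∉ visiting) :
    ((graph.keys).filter (fun x => !((PySem.Set.add visiting node).contains x))).length <
      ((graph.keys).filter (fun x => !(visiting.contains x))).length := by
  refine pvFilterLenLt _ _ _ ?_ node hk ?_ ?_
  · intro x _ hpx
    have hx : x ∉ PySem.Set.add visiting node := by
      simpa [List.contains_eq_mem] using hpx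
    simp only [List.contains_eq_mem, Bool.not_eq_true', decide_eq_false_iff_not]
    exact fun hxv => hx ((PySem.Set.mem_add _ _ _).mpr (Or.inl hxv))
  · simp [List.contains_eq_mem, PySem.Set.mem_add]
  · simpa [List.contains_eq_mem] using hn

mutual
-- literal transliteration of A's `count_reachable_leaves` body (memo/visiting threaded as values;
-- `visiting.remove(node)` is implicit: the callee's additions to `visiting` are never passed back)
def crlA (graph : PySem.Dict String (List String)) (leaves : List String) (node : String)
    (memo : PySem.Dict String (List String)) (visiting : List String) :
    List String × PySem.Dict String (List String) :=
  match memo.get? node with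
  | some v => (v, memo)
  | none =>
    if hv : node ∈ visiting then ([], memo)
    else if node ∈ leaves then ([node], memo.insert node [node])
    else
      match hg : graph.get? node with
      | none => ([node], memo.insert node [node])
      | some deps =>
        let r := goA graph leaves deps [] memo (PySem.Set.add visiting node)
        (r.1, r.2.insert node r.1)
termination_by (((graph.keys).filter (fun x => !(visiting.contains x))).length, 0)
decreasing_by
  exact Prod.Lex.left _ _ (pvMuA_lt graph visiting node
    (by
      by_contra hnk
      exact absurd hg (by simp [(PySem.Dict.get?_eq_none_iff_not_mem_keys _ _).mpr hnk])) hv)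

-- the `for dep in graph[node]: reachable.update(...)` loop of A
def goA (graph : PySem.Dict String (List String)) (leaves : List String) (deps : List String)
    (acc : List String) (memo : PySem.Dict String (List String)) (visiting : List String) :
    List String × PySem.Dict String (List String) :=
  match deps with
  | [] => (acc, memo)
  | d :: ds =>
    let r := crlA graph leaves d memo visiting
    goA graph leaves ds (PySem.Set.update acc r.1) r.2 visiting
termination_by (((graph.keys).filter (fun x => !(visiting.contains x))).length, deps.length + 1)
decreasing_by
  · exact Prod.Lex.right _ (by simp only [List.length_cons]; omega)
  · exact Prod.Lex.right _ (by simp only [List.length_cons]; omega)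
end

def count_reachable_leaves (graph : List (String × List String)) (node : String) (leaves : List String) (memo : Option (List (String × List String))) (visiting : Option (List String)) : List String :=
  (crlA (PySem.Dict.mk graph) leaves node (PySem.Dict.mk (memo.getD [])) (visiting.getD [])).1

-- ===== PORT B =====
-- B's `settle` helper: cached / trivial answer for n, or none if n must be expanded (returns the updated memo)
def settleB (graph : PySem.Dict String (List String)) (leaves : List String)
    (memo : PySem.Dict String (List String)) (visiting : List String) (n : String) :
    Option (List String) × PySem.Dict String (List String) :=
  match memo.get? n with
  | some v => (some v, memo)
  | none =>
    if n ∈ visiting then (some [], memo)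
    else if n ∈ leaves ∨ graph.contains n = false then (some [n], memo.insert n [n])
    else (none, memo)

-- B-side helpers for runB's termination, cited in decreasing_by
theorem settleB_none_facts (graph : PySem.Dict String (List String)) (leaves : List String)
    (memo : PySem.Dict String (List String)) (visiting : List String) (n : String)
    (hs : (settleB graph leaves memo visiting n).1 = none) :
    memo.get? n = none ∧ n ∉ visiting ∧ graph.contains n = true ∧
      (settleB graph leaves memo visiting n).2 = memo := by
  cases hm : memo.get? n with
  | some v => simp [settleB, hm] at hs
  | none =>
    by_cases h1 : n ∈ visiting
    · simp [settleB, hm, h1] at hs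
    · by_cases h2 : n ∈ leaves ∨ graph.contains n = false
      · simp [settleB, hm, h1, h2] at hs
      · have hc : graph.contains n = true := by
          cases hcc : graph.contains n
          · exact absurd (Or.inr hcc) h2
          · rfl
        exact ⟨rfl, h1, hc, by simp [settleB, hm, h1, h2]⟩

theorem settleB_get?_none (graph : PySem.Dict String (List String)) (leaves : List String)
    (memo : PySem.Dict String (List String)) (visiting : List String) (n x : String)
    (h : (settleB graph leaves memo visiting n).2.get? x = none) :
    memo.get? x = none := by
  have h2eq : (settleB graph leaves memo visiting n).2 = memo ∨
      (settleB graph leaves memo visiting n).2 = memo.insert n [n] := by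
    cases hm : memo.get? n with
    | some v => left; simp [settleB, hm]
    | none =>
      by_cases h1 : n ∈ visiting
      · left; simp [settleB, hm, h1]
      · by_cases h2 : n ∈ leaves ∨ graph.contains n = false
        · right; simp [settleB, hm, h1, h2]
        · left; simp [settleB, hm, h1, h2]
  rcases h2eq with he | he
  · rwa [he] at h
  · rw [he, PySem.Dict.get?_insert] at h
    split at h
    · simp at h
    · exact h

theorem pvLexHelper {a b c d : Nat} (h1 : a ≤ c) (h2 : b < d) :
    Prod.Lex (fun x y : Nat => x < y) (fun x y : Nat => x < y) (a, b) (c, d) := by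
  rcases lt_or_eq_of_le h1 with h | h
  · exact Prod.Lex.left _ _ h
  · subst h
    exact Prod.Lex.right _ h2

def pvStackRem (stack : List (String × List String × List String)) : Nat :=
  (stack.map (fun f => f.2.1.length)).sum + stack.length

-- literal transliteration of B's `while True:` loop; state = (memo, visiting, stack of [node, rem, acc])
def runB (graph : PySem.Dict String (List String)) (leaves : List String)
    (memo : PySem.Dict String (List String)) (visiting : List String)
    (stack : List (String × List String × List String)) : List String :=
  match stack with
  | [] => []  -- unreachable: the loop is entered with a nonempty stack and returns when it empties
  | (n, rem, acc) :: rest =>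
    match rem with
    | [] =>
      let memo' := memo.insert n acc
      let visiting' := PySem.Set.discard visiting n
      match rest with
      | [] => acc
      | (pn, prem, pacc) :: rrest =>
        runB graph leaves memo' visiting' ((pn, prem, PySem.Set.update pacc acc) :: rrest)
    | d :: ds =>
      let s := settleB graph leaves memo visiting d
      match hs : s.1 with
      | some r => runB graph leaves s.2 visiting ((n, ds, PySem.Set.update acc r) :: rest)
      | none =>
        runB graph leaves s.2 (PySem.Set.add visiting d)
          ((d, (graph.get? d).getD [], []) :: (n, ds, acc) :: rest)
termination_by
  ((((graph.keys).filter (fun x => ((memo.get? x).isNone && !(visiting.contains x)))).length),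
    pvStackRem stack)
decreasing_by
  · refine pvLexHelper ?_ (by simp [pvStackRem]; try omega)
    apply pvFilterLenLe
    intro x _ hx
    simp only [Bool.and_eq_true, Bool.not_eq_true', List.contains_eq_mem,
      decide_eq_false_iff_not, Option.isNone_iff_eq_none] at hx ⊢
    rcases hx with ⟨hx1, hx2⟩
    rw [PySem.Dict.get?_insert] at hx1
    split at hx1
    · simp at hx1
    · rename_i hne
      refine ⟨hx1, fun hxv => hx2 ?_⟩
      exact (PySem.Set.mem_discard _ _ _).mpr ⟨hxv, hne⟩
  · refine pvLexHelper ?_ (by simp [pvStackRem]; try omega)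
    apply pvFilterLenLe
    intro x _ hx
    simp only [Bool.and_eq_true, Option.isNone_iff_eq_none] at hx ⊢
    exact ⟨settleB_get?_none _ _ _ _ _ _ hx.1, hx.2⟩
  · obtain ⟨hm, hv, hc, hmemo⟩ := settleB_none_facts graph leaves memo visiting d hs
    rw [hmemo]
    apply Prod.Lex.left
    refine pvFilterLenLt _ _ _ ?_ d ((PySem.Dict.contains_iff_mem_keys _ _).mp hc) ?_ ?_
    · intro x _ hx
      simp only [Bool.and_eq_true, Bool.not_eq_true', List.contains_eq_mem,
        decide_eq_false_iff_not] at hx ⊢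
      exact ⟨hx.1, fun hxv => hx.2 ((PySem.Set.mem_add _ _ _).mpr (Or.inl hxv))⟩
    · simp [List.contains_eq_mem, PySem.Set.mem_add]
    · simp [List.contains_eq_mem, hm, hv]

def count_reachable_leaves_alt (graph : List (String × List String)) (node : String) (leaves : List String) (memo : Option (List (String × List String))) (visiting : Option (List String)) : List String :=
  let G := PySem.Dict.mk graph
  let m := PySem.Dict.mk (memo.getD [])
  let v := visiting.getD []
  let s := settleB G leaves m v node
  match s.1 with
  | some r => r
  | none =>
    -- (G.get? node).getD [] is graph[node]; settle returned none, so the key is present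
    runB G leaves s.2 (PySem.Set.add v node) [(node, (G.get? node).getD [], [])]

-- ===== PRECONDITION & SPEC =====
def Spec_count_reachable_leaves (graph : List (String × List String)) (node : String) (leaves : List String) (memo : Option (List (String × List String))) (visiting : Option (List String)) (out : List String) : Prop := out = count_reachable_leaves_alt graph node leaves memo visiting
instance (graph : List (String × List String)) (node : String) (leaves : List String) (memo : Option (List (String × List String))) (visiting : Option (List String)) (out : List String) : Decidable (Spec_count_reachable_leaves graph node leaves memo visiting out) := by unfold Spec_count_reachable_leaves; infer_instance

-- ===== CLAIM (what is proved, stated in full; the proofs are below) =====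
def Claim_equal_count_reachable_leaves : Prop := ∀ (graph : List (String × List String)) (node : String) (leaves : List String) (memo : Option (List (String × List String))) (visiting : Option (List String)), Dom_count_reachable_leaves graph node leaves memo visiting → Spec_count_reachable_leaves graph node leaves memo visiting (count_reachable_leaves graph node leaves memo visiting)

-- ===== LEMMAS AND PROOFS =====

-- step lemmas for the well-founded definitions
theorem crlA_memo_hit {graph : PySem.Dict String (List String)} {leaves : List String}
    {node : String} {memo : PySem.Dict String (List String)} {visiting : List String}
    {r : List String} (h : memo.get? node = some r) :
    crlA graph leaves node memo visiting = (r, memo) := by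
  rw [crlA.eq_def]
  simp [h]

theorem crlA_vis_hit {graph : PySem.Dict String (List String)} {leaves : List String}
    {node : String} {memo : PySem.Dict String (List String)} {visiting : List String}
    (h : memo.get? node = none) (hv : node ∈ visiting) :
    crlA graph leaves node memo visiting = ([], memo) := by
  rw [crlA.eq_def]
  simp [h, hv]

theorem crlA_leaf {graph : PySem.Dict String (List String)} {leaves : List String}
    {node : String} {memo : PySem.Dict String (List String)} {visiting : List String}
    (h : memo.get? node = none) (hv : node ∉ visiting) (hl : node ∈ leaves) :
    crlA graph leaves node memo visiting = ([node], memo.insert node [node]) := by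
  rw [crlA.eq_def]
  simp [h, hv, hl]

theorem crlA_sink {graph : PySem.Dict String (List String)} {leaves : List String}
    {node : String} {memo : PySem.Dict String (List String)} {visiting : List String}
    (h : memo.get? node = none) (hv : node ∉ visiting) (hl : node ∉ leaves)
    (hg : graph.get? node = none) :
    crlA graph leaves node memo visiting = ([node], memo.insert node [node]) := by
  rw [crlA.eq_def]
  simp only [h, dif_neg hv, if_neg hl]
  split
  next heq => rfl
  next deps heq =>
    rw [hg] at heq
    simp at heq

theorem crlA_expand {graph : PySem.Dict String (List String)} {leaves : List String}
    {node : String} {memo : PySem.Dict String (List String)} {visiting : List String}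
    {deps : List String}
    (h : memo.get? node = none) (hv : node ∉ visiting) (hl : node ∉ leaves)
    (hg : graph.get? node = some deps) :
    crlA graph leaves node memo visiting =
      ((goA graph leaves deps [] memo (PySem.Set.add visiting node)).1,
       (goA graph leaves deps [] memo (PySem.Set.add visiting node)).2.insert node
         (goA graph leaves deps [] memo (PySem.Set.add visiting node)).1) := by
  rw [crlA.eq_def]
  simp only [h, dif_neg hv, if_neg hl]
  split
  next heq =>
    rw [hg] at heq
    simp at heq
  next deps' heq =>
    rw [hg] at heq
    injection heq with hh
    subst hh
    rfl

theorem goA_nil {graph : PySem.Dict String (List String)} {leaves : List String}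
    {acc : List String} {memo : PySem.Dict String (List String)} {visiting : List String} :
    goA graph leaves [] acc memo visiting = (acc, memo) := by
  rw [goA.eq_def]

theorem goA_cons {graph : PySem.Dict String (List String)} {leaves : List String}
    {d : String} {ds acc : List String} {memo : PySem.Dict String (List String)}
    {visiting : List String} :
    goA graph leaves (d :: ds) acc memo visiting =
      goA graph leaves ds (PySem.Set.update acc (crlA graph leaves d memo visiting).1)
        (crlA graph leaves d memo visiting).2 visiting := by
  rw [goA.eq_def]

theorem runB_pop_last {graph : PySem.Dict String (List String)} {leaves : List String}
    {memo : PySem.Dict String (List String)} {visiting : List String}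
    {n : String} {acc : List String} :
    runB graph leaves memo visiting [(n, [], acc)] = acc := by
  rw [runB.eq_def]

theorem runB_pop {graph : PySem.Dict String (List String)} {leaves : List String}
    {memo : PySem.Dict String (List String)} {visiting : List String}
    {n : String} {acc : List String} {pn : String} {prem pacc : List String}
    {rrest : List (String × List String × List String)} :
    runB graph leaves memo visiting ((n, [], acc) :: (pn, prem, pacc) :: rrest) =
      runB graph leaves (memo.insert n acc) (PySem.Set.discard visiting n)
        ((pn, prem, PySem.Set.update pacc acc) :: rrest) := by
  rw [runB.eq_def]

theorem runB_step_some {graph : PySem.Dict String (List String)} {leaves : List String}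
    {memo : PySem.Dict String (List String)} {visiting : List String}
    {n d : String} {ds acc : List String} {rest : List (String × List String × List String)}
    {r : List String} (h : (settleB graph leaves memo visiting d).1 = some r) :
    runB graph leaves memo visiting ((n, d :: ds, acc) :: rest) =
      runB graph leaves (settleB graph leaves memo visiting d).2 visiting
        ((n, ds, PySem.Set.update acc r) :: rest) := by
  rw [runB.eq_def]
  dsimp only
  split
  · rename_i r' heq
    rw [h] at heq
    injection heq with hh
    subst hh
    rfl
  · rename_i heq
    rw [h] at heq
    simp at heq

theorem runB_step_none {graph : PySem.Dict String (List String)} {leaves : List String}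
    {memo : PySem.Dict String (List String)} {visiting : List String}
    {n d : String} {ds acc : List String} {rest : List (String × List String × List String)}
    (h : (settleB graph leaves memo visiting d).1 = none) :
    runB graph leaves memo visiting ((n, d :: ds, acc) :: rest) =
      runB graph leaves (settleB graph leaves memo visiting d).2 (PySem.Set.add visiting d)
        ((d, (graph.get? d).getD [], []) :: (n, ds, acc) :: rest) := by
  rw [runB.eq_def]
  dsimp only
  split
  · rename_i r' heq
    rw [h] at heq
    simp at heq
  · rfl

theorem pv_discard_add (v : List String) (d : String) (hd : d ∉ v) :
    PySem.Set.discard (PySem.Set.add v d) d = v := by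
  rw [PySem.Set.add_of_not_mem hd]
  simp only [PySem.Set.discard, List.filter_append]
  have h1 : v.filter (fun y => !(y == d)) = v :=
    List.filter_eq_self.mpr (fun a ha => by
      simp only [Bool.not_eq_true', beq_eq_false_iff_ne]
      exact fun hade => hd (hade ▸ ha))
  simp [h1]

-- the simulation: one stack frame of runB computes exactly A's dep-loop goA, then pops
theorem pv_sim (graph : PySem.Dict String (List String)) (leaves : List String) :
    ∀ (N : Nat) (visiting : List String),
      (((graph.keys).filter (fun x => !(visiting.contains x))).length = N) →
      ∀ (deps acc : List String) (memo : PySem.Dict String (List String))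
        (n : String) (rest : List (String × List String × List String)),
      runB graph leaves memo visiting ((n, deps, acc) :: rest) =
        (match rest with
         | [] => (goA graph leaves deps acc memo visiting).1
         | (pn, prem, pacc) :: rrest =>
             runB graph leaves
               ((goA graph leaves deps acc memo visiting).2.insert n
                 (goA graph leaves deps acc memo visiting).1)
               (PySem.Set.discard visiting n)
               ((pn, prem, PySem.Set.update pacc
                 (goA graph leaves deps acc memo visiting).1) :: rrest)) := by
  intro N
  induction N using Nat.strong_induction_on with
  | _ N IHN =>
    intro visiting hN deps
    induction deps with
    | nil =>
      intro acc memo n rest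
      rcases rest with _ | ⟨⟨pn, prem, pacc⟩, rrest⟩
      · simp [runB_pop_last, goA_nil]
      · simp [runB_pop, goA_nil]
    | cons d ds IHd =>
      intro acc memo n rest
      cases hm : memo.get? d with
      | some r =>
        have hset : (settleB graph leaves memo visiting d) = (some r, memo) := by
          simp [settleB, hm]
        rw [runB_step_some (by rw [hset])]
        rw [hset]
        rw [goA_cons, crlA_memo_hit hm]
        exact IHd (PySem.Set.update acc r) memo n rest
      | none =>
        by_cases h1 : d ∈ visiting
        · have hset : (settleB graph leaves memo visiting d) = (some [], memo) := by
            simp [settleB, hm, h1]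
          rw [runB_step_some (by rw [hset])]
          rw [hset]
          rw [goA_cons, crlA_vis_hit hm h1]
          exact IHd (PySem.Set.update acc []) memo n rest
        · by_cases h2 : d ∈ leaves
          · have hset : (settleB graph leaves memo visiting d)
                = (some [d], memo.insert d [d]) := by
              simp [settleB, hm, h1, h2]
            rw [runB_step_some (by rw [hset])]
            rw [hset]
            rw [goA_cons, crlA_leaf hm h1 h2]
            exact IHd (PySem.Set.update acc [d]) (memo.insert d [d]) n rest
          · cases hg : graph.get? d with
            | none =>
              have hcf : graph.contains d = false :=
                (PySem.Dict.get?_eq_none_iff_contains _ _).mp hg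
              have hset : (settleB graph leaves memo visiting d)
                  = (some [d], memo.insert d [d]) := by
                simp [settleB, hm, h1, h2, hcf]
              rw [runB_step_some (by rw [hset])]
              rw [hset]
              rw [goA_cons, crlA_sink hm h1 h2 hg]
              exact IHd (PySem.Set.update acc [d]) (memo.insert d [d]) n rest
            | some depsd =>
              have hct : graph.contains d = true := by
                cases hcc : graph.contains d
                · exact absurd hg (by
                    rw [(PySem.Dict.get?_eq_none_iff_contains _ _).mpr hcc]
                    simp)
                · rfl
              have hset : (settleB graph leaves memo visiting d) = (none, memo) := by
                simp [settleB, hm, h1, h2, hct]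
              rw [runB_step_none (by rw [hset])]
              rw [hset]
              -- the pushed frame: child d expanded with visiting ∪ {d}
              have hkd : d ∈ graph.keys := (PySem.Dict.contains_iff_mem_keys _ _).mp hct
              have hmu : (((graph.keys).filter
                  (fun x => !((PySem.Set.add visiting d).contains x))).length) < N :=
                hN ▸ pvMuA_lt graph visiting d hkd h1
              have hchild := IHN _ hmu (PySem.Set.add visiting d) rfl depsd [] memo d
                ((n, ds, acc) :: rest)
              simp only [hg, Option.getD_some] at hchild ⊢
              rw [hchild]
              rw [pv_discard_add visiting d h1]
              rw [goA_cons, crlA_expand hm h1 h2 hg]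
              exact IHd (PySem.Set.update acc
                (goA graph leaves depsd [] memo (PySem.Set.add visiting d)).1)
                ((goA graph leaves depsd [] memo (PySem.Set.add visiting d)).2.insert d
                  (goA graph leaves depsd [] memo (PySem.Set.add visiting d)).1) n rest

-- ===== VERDICT (by name: the statement is the Claim_ definition above) =====
theorem count_reachable_leaves_spec : Claim_equal_count_reachable_leaves := by
  unfold Claim_equal_count_reachable_leaves
  intro graph node leaves memo visiting _
  unfold Spec_count_reachable_leaves
  unfold count_reachable_leaves count_reachable_leaves_alt
  cases hm : (PySem.Dict.mk (memo.getD [])).get? node with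
  | some r =>
    simp [settleB, hm, crlA_memo_hit hm]
  | none =>
    by_cases h1 : node ∈ visiting.getD []
    · simp [settleB, hm, h1, crlA_vis_hit hm h1]
    · by_cases h2 : node ∈ leaves
      · simp [settleB, hm, h1, h2, crlA_leaf hm h1 h2]
      · cases hg : (PySem.Dict.mk graph).get? node with
        | none =>
          have hcf : (PySem.Dict.mk graph).contains node = false :=
            (PySem.Dict.get?_eq_none_iff_contains _ _).mp hg
          simp [settleB, hm, h1, h2, hcf, crlA_sink hm h1 h2 hg]
        | some deps =>
          have hct : (PySem.Dict.mk graph).contains node = true := by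
            cases hcc : (PySem.Dict.mk graph).contains node
            · exact absurd hg (by
                rw [(PySem.Dict.get?_eq_none_iff_contains _ _).mpr hcc]
                simp)
            · rfl
          have hset : settleB (PySem.Dict.mk graph) leaves (PySem.Dict.mk (memo.getD []))
              (visiting.getD []) node = (none, PySem.Dict.mk (memo.getD [])) := by
            simp [settleB, hm, h1, h2, hct]
          simp only [hset, hg, Option.getD_some]
          rw [crlA_expand hm h1 h2 hg]
          have := pv_sim (PySem.Dict.mk graph) leaves
            (((PySem.Dict.mk graph).keys.filter
              (fun x => !((PySem.Set.add (visiting.getD []) node).contains x))).length)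
            (PySem.Set.add (visiting.getD []) node) rfl deps [] (PySem.Dict.mk (memo.getD []))
            node []
          simp only at this
          rw [this]
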